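-- pv_equiv track=rewrite | github.com/He-tao-re/Slot_Code | Games/Game_10040_Pirate/Priatefunction.py | AllCombo
-- ===== SOURCE A (Python) =====
-- def AllCombo(NumberOf_sym,row,col):
--     combo=[]
--     for i in range(NumberOf_sym):
--         for j in range(NumberOf_sym):
--             for k in range(NumberOf_sym):
--                 for m in range(NumberOf_sym):
--                     for n in range(NumberOf_sym):
--                         one_combo=[i,j,k,m,n]
--                         for x in range(col):
--                             if one_combo[x]==9:one_combo[x]=90
--                             if one_combo[x]==10:one_combo[x]=92
--
--
--                         combo.append(one_combo)
--     return combo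
-- ===== SOURCE B (Python) =====
-- def AllCombo(NumberOf_sym, row, col):
--     combo = []
--     for idx in range(NumberOf_sym ** 5):
--         # decode idx into 5 base-NumberOf_sym digits, most significant first
--         one_combo = []
--         r = idx
--         for _ in range(5):
--             r, d = divmod(r, NumberOf_sym)
--             one_combo.append(d)
--         one_combo.reverse()
--         for x in range(col):
--             if one_combo[x] == 9:
--                 one_combo[x] = 90
--             elif one_combo[x] == 10:
--                 one_combo[x] = 92
--         combo.append(one_combo)
--     return combo
-- ===== Notes on version B (the rewrite author's own statement) =====
-- stated objective: alternative
-- what changed: Replaces the five nested loops by a single loop over range(NumberOf_sym**5) that decodes each index into five base-NumberOf_sym digits (most significant first) via repeated divmod.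
-- outside the precondition, e.g. on AllCombo(2, 0, 6): A raises IndexError, B raises IndexError
import Mathlib
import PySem

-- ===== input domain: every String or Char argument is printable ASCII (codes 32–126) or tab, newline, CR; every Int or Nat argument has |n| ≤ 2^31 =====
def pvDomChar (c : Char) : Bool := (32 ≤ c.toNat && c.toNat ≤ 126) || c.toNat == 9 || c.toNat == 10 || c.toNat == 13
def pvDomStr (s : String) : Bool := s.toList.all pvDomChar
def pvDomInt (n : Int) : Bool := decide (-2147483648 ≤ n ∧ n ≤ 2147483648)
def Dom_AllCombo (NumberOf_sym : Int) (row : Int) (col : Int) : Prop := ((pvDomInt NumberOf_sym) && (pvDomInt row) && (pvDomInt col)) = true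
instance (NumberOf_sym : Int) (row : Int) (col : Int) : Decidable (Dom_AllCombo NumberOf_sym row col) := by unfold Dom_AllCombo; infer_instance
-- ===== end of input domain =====

-- B replaces A's five nested loops by one loop over range(NumberOf_sym**5) that decodes
-- each index into five base-NumberOf_sym digits via repeated divmod (objective: alternative).

-- ===== PORT A =====
-- 'for x in range(col): if one_combo[x]==9: …; if one_combo[x]==10: …'.
-- An out-of-range one_combo[x] raises IndexError in Python (pyGet? = none); Pre_ excludes
-- those inputs, and the port leaves the list unchanged there (totality guard only).
def remapA (col : Int) (l0 : List Int) : List Int :=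
  (PySem.List.pyRange 0 col 1).foldl (fun l x =>
    let l1 := if PySem.List.pyGet? l x = some (9 : Int) then l.set x.toNat 90 else l
    if PySem.List.pyGet? l1 x = some (10 : Int) then l1.set x.toNat 92 else l1) l0

def AllCombo (NumberOf_sym : Int) (row : Int) (col : Int) : List (List Int) :=
  let R := PySem.List.pyRange 0 NumberOf_sym 1
  R.foldl (fun combo i =>
    R.foldl (fun combo j =>
      R.foldl (fun combo k =>
        R.foldl (fun combo m =>
          R.foldl (fun combo n =>
            combo ++ [remapA col [i, j, k, m, n]]) combo) combo) combo) combo) []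

-- ===== PORT B =====
-- one divmod step: r, d = divmod(r, N); one_combo.append(d)  (divmod? = none only for N = 0,
-- unreachable because then range(N**5) is empty; the guard returns the state unchanged)
def stepB (N : Int) (p : Int × List Int) : Int × List Int :=
  match PySem.Int.divmod? p.1 N with
  | some qd => (qd.1, p.2 ++ [qd.2])
  | none => p

def decodeB (N idx : Int) : List Int :=
  (((List.range 5).foldl (fun p _ => stepB N p) (idx, ([] : List Int))).2).reverse

-- the 'for x in range(col)' remap loop of Source B (same guard remark as for remapA)
def remapB (col : Int) (l0 : List Int) : List Int :=
  (PySem.List.pyRange 0 col 1).foldl (fun l x =>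
    if PySem.List.pyGet? l x = some (9 : Int) then l.set x.toNat 90
    else if PySem.List.pyGet? l x = some (10 : Int) then l.set x.toNat 92
    else l) l0

def AllCombo_alt (NumberOf_sym : Int) (row : Int) (col : Int) : List (List Int) :=
  (PySem.List.pyRange 0 (NumberOf_sym ^ 5) 1).foldl (fun combo idx =>
    combo ++ [remapB col (decodeB NumberOf_sym idx)]) []

-- ===== PRECONDITION & SPEC =====
-- Pre_ excludes exactly the inputs where Python A raises IndexError (col ≥ 6 while at
-- least one combination is produced); B raises there too.
def Pre_AllCombo (NumberOf_sym : Int) (row : Int) (col : Int) : Prop :=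
  NumberOf_sym ≤ 0 ∨ col ≤ 5

instance (NumberOf_sym : Int) (row : Int) (col : Int) : Decidable (Pre_AllCombo NumberOf_sym row col) := by
  unfold Pre_AllCombo; infer_instance

def pvWitness_AllCombo : Int × Int × Int := (3, 1, 5)

def Spec_AllCombo (NumberOf_sym : Int) (row : Int) (col : Int) (out : List (List Int)) : Prop :=
  out = AllCombo_alt NumberOf_sym row col

instance (NumberOf_sym : Int) (row : Int) (col : Int) (out : List (List Int)) : Decidable (Spec_AllCombo NumberOf_sym row col out) := by
  unfold Spec_AllCombo; infer_instance

-- ===== CLAIM (what is proved, stated in full; the proofs are below) =====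
def Claim_equal_AllCombo : Prop := ∀ (NumberOf_sym : Int) (row : Int) (col : Int), Dom_AllCombo NumberOf_sym row col → Pre_AllCombo NumberOf_sym row col → Spec_AllCombo NumberOf_sym row col (AllCombo NumberOf_sym row col)

-- ===== LEMMAS AND PROOFS =====

-- the two remap loops agree on every list (A's second 'if' never fires after the first set)
theorem remapA_eq_remapB (col : Int) (l0 : List Int) : remapA col l0 = remapB col l0 := by
  unfold remapA remapB
  refine PySem.List.foldl_congr_mem _ _ _ _ (fun l x hx => ?_)
  have hx0 : 0 ≤ x := ((PySem.List.mem_pyRange_one).1 hx).1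
  by_cases h9 : PySem.List.pyGet? l x = some (9 : Int)
  · have hlt : x.toNat < l.length := by
      have hin : PySem.Raise.InRange l.length x := by
        by_contra hc
        rw [← PySem.List.pyGet?_eq_none_iff] at hc
        simp [hc] at h9
      unfold PySem.Raise.InRange at hin
      omega
    have hset : PySem.List.pyGet? (l.set x.toNat 90) x = some (90 : Int) := by
      rw [PySem.List.pyGet?_of_nonneg _ hx0]
      simp [hlt]
    simp [h9, hset]
  · simp [h9]

-- divmod on a decomposed value
theorem divmod_step (N q r : Int) (hN : 0 < N) (h0 : 0 ≤ r) (h1 : r < N) :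
    PySem.Int.divmod? (q * N + r) N = some (q, r) := by
  have hne : N ≠ 0 := by omega
  have hd : PySem.Int.floordiv (q * N + r) N = q := by
    rw [PySem.Int.floordiv_eq_iff_of_pos hN]; constructor <;> nlinarith
  have hm : PySem.Int.mod (q * N + r) N = r := by
    have := PySem.Int.floordiv_mul_add_mod (q * N + r) N
    rw [hd] at this; omega
  have hd' : (q * N + r).fdiv N = q := hd
  have hm' : (q * N + r).fmod N = r := hm
  simp [PySem.Int.divmod?, hne, hd', hm']

theorem stepB_eq (N q r : Int) (l : List Int) (hN : 0 < N) (h0 : 0 ≤ r) (h1 : r < N) :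
    stepB N (q * N + r, l) = (q, l ++ [r]) := by
  unfold stepB; rw [divmod_step N q r hN h0 h1]

-- decoding the lexicographic rank of (i,j,k,m,p) gives back the digits, MSB first
theorem decodeB_rank (N i j k m p : Int) (hN : 0 < N)
    (hi : 0 ≤ i ∧ i < N) (hj : 0 ≤ j ∧ j < N) (hk : 0 ≤ k ∧ k < N)
    (hm : 0 ≤ m ∧ m < N) (hp : 0 ≤ p ∧ p < N) :
    decodeB N ((((i * N + j) * N + k) * N + m) * N + p) = [i, j, k, m, p] := by
  unfold decodeB
  have hr : List.range 5 = [0, 1, 2, 3, 4] := by decide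
  rw [hr]
  simp only [List.foldl_cons, List.foldl_nil]
  rw [stepB_eq N ((((i * N + j) * N + k) * N + m)) p [] hN hp.1 hp.2]
  simp only [List.nil_append]
  rw [stepB_eq N (((i * N + j) * N + k)) m [p] hN hm.1 hm.2]
  simp only [List.cons_append, List.nil_append]
  rw [stepB_eq N ((i * N + j)) k [p, m] hN hk.1 hk.2]
  simp only [List.cons_append, List.nil_append]
  rw [stepB_eq N i j [p, m, k] hN hj.1 hj.2]
  simp only [List.cons_append, List.nil_append]
  have h0 : stepB N (i, [p, m, k, j]) = (0, [p, m, k, j] ++ [i]) := by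
    have := stepB_eq N 0 i [p, m, k, j] hN hi.1 hi.2
    simpa using this
  rw [h0]
  simp

-- base-b expansion of range (a*b)
theorem range_mul_flatMap {α : Type} (a b : ℕ) (f : ℕ → α) :
    (List.range (a * b)).map f
      = (List.range a).flatMap (fun i => (List.range b).map (fun r => f (b * i + r))) := by
  induction a with
  | zero => simp
  | succ a ih =>
    rw [show (a + 1) * b = a * b + b from by ring, List.range_add, List.map_append,
        List.map_map, ih, List.range_succ, List.flatMap_append]
    congr 1
    simp only [List.flatMap_cons, List.flatMap_nil, List.append_nil]
    refine List.map_congr_left fun r _ => ?_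
    rw [Nat.mul_comm a b]
    rfl

theorem AllCombo_eq_flatMap (N row col : Int) :
    AllCombo N row col
      = (PySem.List.pyRange 0 N 1).flatMap (fun i =>
          (PySem.List.pyRange 0 N 1).flatMap (fun j =>
            (PySem.List.pyRange 0 N 1).flatMap (fun k =>
              (PySem.List.pyRange 0 N 1).flatMap (fun m =>
                (PySem.List.pyRange 0 N 1).map (fun n =>
                  remapA col [i, j, k, m, n]))))) := by
  unfold AllCombo
  simp only [PySem.List.foldl_append_singleton_eq_map, PySem.List.foldl_append_eq_flatMap,
    List.nil_append]

theorem AllCombo_alt_eq_map (N row col : Int) :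
    AllCombo_alt N row col
      = (PySem.List.pyRange 0 (N ^ 5) 1).map (fun idx => remapB col (decodeB N idx)) := by
  unfold AllCombo_alt
  simp only [PySem.List.foldl_append_singleton_eq_map, List.nil_append]

-- ===== VERDICT (by name: the statement is the Claim_ definition above) =====
set_option maxRecDepth 8000 in
theorem AllCombo_spec : Claim_equal_AllCombo := by
  intro N row col _ _
  unfold Spec_AllCombo
  rw [AllCombo_eq_flatMap, AllCombo_alt_eq_map]
  by_cases hN : N ≤ 0
  · have h1 : PySem.List.pyRange 0 N 1 = [] := PySem.List.pyRange_one_eq_nil (by omega)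
    have h2 : PySem.List.pyRange 0 (N ^ 5) 1 = [] := by
      refine PySem.List.pyRange_one_eq_nil ?_
      have : N ^ 5 ≤ 0 := by nlinarith [sq_nonneg N, sq_nonneg (N^2)]
      omega
    simp [h1, h2]
  · obtain ⟨n, rfl⟩ := Int.eq_ofNat_of_zero_le (by omega : (0:Int) ≤ N)
    have hn : 0 < n := by omega
    have hR : PySem.List.pyRange 0 (n : Int) 1
        = (List.range n).map (fun (k : ℕ) => (k : Int)) := by
      rw [PySem.List.pyRange_one]
      rw [show (((n : Int)) - 0).toNat = n from by simp]
      exact List.map_congr_left (fun k _ => by simp)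
    have hc5 : ((n : Int) ^ 5 - 0).toNat = n ^ 5 := by
      rw [sub_zero]
      rw [show ((n : Int) ^ 5) = ((n ^ 5 : ℕ) : Int) from by push_cast; ring]
      exact Int.toNat_natCast (n ^ 5)
    have hR5 : PySem.List.pyRange 0 ((n : Int) ^ 5) 1
        = (List.range (n ^ 5)).map (fun (k : ℕ) => (k : Int)) := by
      rw [PySem.List.pyRange_one, hc5]
      exact List.map_congr_left (fun k _ => by simp)
    rw [hR, hR5]
    simp only [List.map_map, List.flatMap_map]
    rw [show n ^ 5 = n * (n * (n * (n * n))) from by ring]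
    rw [range_mul_flatMap n (n * (n * (n * n)))]
    refine List.flatMap_congr fun i hi => ?_
    rw [range_mul_flatMap n (n * (n * n))]
    refine List.flatMap_congr fun j hj => ?_
    rw [range_mul_flatMap n (n * n)]
    refine List.flatMap_congr fun k hk => ?_
    rw [range_mul_flatMap n n]
    refine List.flatMap_congr fun m hm => ?_
    refine List.map_congr_left fun p hp => ?_
    have hi' := List.mem_range.1 hi
    have hj' := List.mem_range.1 hj
    have hk' := List.mem_range.1 hk
    have hm' := List.mem_range.1 hm
    have hp' := List.mem_range.1 hp
    simp only [Function.comp]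
    have hv : ((n * (n * (n * n)) * i + (n * (n * n) * j + (n * n * k + (n * m + p))) : ℕ) : Int)
        = ((((i : Int) * n + j) * n + k) * n + m) * n + p := by push_cast; ring
    rw [hv, decodeB_rank (n : Int) i j k m p (by exact_mod_cast hn)
      ⟨by positivity, by exact_mod_cast hi'⟩ ⟨by positivity, by exact_mod_cast hj'⟩
      ⟨by positivity, by exact_mod_cast hk'⟩ ⟨by positivity, by exact_mod_cast hm'⟩
      ⟨by positivity, by exact_mod_cast hp'⟩, remapA_eq_remapB]
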